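-- pv_equiv track=rewrite | github.com/ciphernet01/sentinelstack | AI 30 Days/sessionguard_pro.py | _score_session_flow
-- ===== SOURCE A (Python) =====
-- def _score_session_flow(finding):
--     """Score session flow analysis."""
--     score = 50  # Neutral starting point
--
--     # Deduct for vulnerabilities
--     vulnerabilities = finding.get("vulnerabilities", [])
--     for vuln in vulnerabilities:
--         if "session_fixation" in vuln:
--             score -= 30
--         elif "logout_doesnt_clear_session" in vuln:
--             score -= 25
--         elif "concurrent_sessions_allowed" in vuln:
--             score -= 20
--         elif "low_session_entropy" in vuln:
--             score -= 15
--
--     # Add for security measures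
--     classification = finding.get("classification", [])
--     if "comprehensive_security_headers" in classification:
--         score += 20
--
--     # Ensure score is in bounds
--     return max(0, min(100, score))
-- ===== SOURCE B (Python) =====
-- _PENALTIES = (
--     ("session_fixation", 30),
--     ("logout_doesnt_clear_session", 25),
--     ("concurrent_sessions_allowed", 20),
--     ("low_session_entropy", 15),
-- )
--
-- def _score_session_flow(finding):
--     """Keyword-outer staged scan: for each keyword in priority order, penalize
--     every not-yet-matched vuln containing it, then drop those vulns from the pool.
--     Each vuln is thus charged once, at its highest-priority keyword, which equals
--     A's per-vuln elif cascade."""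
--     score = 50
--     remaining = list(finding.get("vulnerabilities", []))
--     for kw, penalty in _PENALTIES:
--         matched = [v for v in remaining if kw in v]
--         score -= penalty * len(matched)
--         remaining = [v for v in remaining if kw not in v]
--     if "comprehensive_security_headers" in finding.get("classification", []):
--         score += 20
--     return max(0, min(100, score))
-- ===== Notes on version B (the rewrite author's own statement) =====
-- stated objective: alternative
-- what changed: Inverts the loop nesting: instead of walking vulnerabilities and running an elif cascade per item, B walks the keyword table outer, at each stage penalizing penalty*count of remaining vulns that contain the keyword and filtering them out of the pool, so each vuln is charged once at its highest-priority keyword.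
import Mathlib
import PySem

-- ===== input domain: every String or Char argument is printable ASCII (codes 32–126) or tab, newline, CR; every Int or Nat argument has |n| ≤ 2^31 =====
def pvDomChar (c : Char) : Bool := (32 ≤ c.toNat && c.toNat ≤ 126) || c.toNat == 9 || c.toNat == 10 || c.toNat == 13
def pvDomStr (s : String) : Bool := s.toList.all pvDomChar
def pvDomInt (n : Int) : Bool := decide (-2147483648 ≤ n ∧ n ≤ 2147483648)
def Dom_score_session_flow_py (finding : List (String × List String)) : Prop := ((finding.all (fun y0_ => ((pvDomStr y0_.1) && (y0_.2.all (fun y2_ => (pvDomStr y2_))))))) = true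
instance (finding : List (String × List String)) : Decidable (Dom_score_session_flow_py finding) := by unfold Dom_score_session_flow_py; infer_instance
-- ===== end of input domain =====

-- B inverts A's loop nesting: keywords outer with staged filtering of matched
-- vulnerabilities, instead of a per-vulnerability elif cascade (alternative, same cost).


-- ===== PORT A =====
def score_session_flow_py (finding : List (String × List String)) : Int :=
  let vulnerabilities := PySem.Dict.getD (PySem.Dict.mk finding) "vulnerabilities" []
  let score := vulnerabilities.foldl (fun score vuln =>
    if PySem.Str.isIn "session_fixation" vuln then score - 30
    else if PySem.Str.isIn "logout_doesnt_clear_session" vuln then score - 25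
    else if PySem.Str.isIn "concurrent_sessions_allowed" vuln then score - 20
    else if PySem.Str.isIn "low_session_entropy" vuln then score - 15
    else score) (50 : Int)
  let classification := PySem.Dict.getD (PySem.Dict.mk finding) "classification" []
  let score := if classification.contains "comprehensive_security_headers" then score + 20 else score
  max 0 (min 100 score)

-- ===== PORT B =====
def pvPenaltyTable : List (String × Int) :=
  [("session_fixation", 30), ("logout_doesnt_clear_session", 25),
   ("concurrent_sessions_allowed", 20), ("low_session_entropy", 15)]

-- keyword-outer staged loop: penalize matching vulns, drop them from the pool
def pvKwLoop : List (String × Int) → Int → List String → Int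
  | [], score, _ => score
  | (kw, p) :: rest, score, remaining =>
      let matched := remaining.filter (fun v => PySem.Str.isIn kw v)
      let score := score - p * (matched.length : Int)
      pvKwLoop rest score (remaining.filter (fun v => ¬ PySem.Str.isIn kw v))

def score_session_flow_py_alt (finding : List (String × List String)) : Int :=
  let score := pvKwLoop pvPenaltyTable 50 (PySem.Dict.getD (PySem.Dict.mk finding) "vulnerabilities" [])
  let score := if (PySem.Dict.getD (PySem.Dict.mk finding) "classification" []).contains "comprehensive_security_headers" then score + 20 else score
  max 0 (min 100 score)

-- ===== PRECONDITION & SPEC =====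
def Spec_score_session_flow_py (finding : List (String × List String)) (out : Int) : Prop := out = score_session_flow_py_alt finding
instance (finding : List (String × List String)) (out : Int) : Decidable (Spec_score_session_flow_py finding out) := by unfold Spec_score_session_flow_py; infer_instance

-- ===== CLAIM (what is proved, stated in full; the proofs are below) =====
def Claim_equal_score_session_flow_py : Prop := ∀ (finding : List (String × List String)), Dom_score_session_flow_py finding → Spec_score_session_flow_py finding (score_session_flow_py finding)

-- ===== LEMMAS AND PROOFS =====

-- first-match penalty w.r.t. a table (proof-side characterisation)
def pvPen : List (String × Int) → String → Int
  | [], _ => 0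
  | (kw, p) :: rest, v => if PySem.Str.isIn kw v then p else pvPen rest v

theorem pv_sum_pen_cons (kw : String) (p : Int) (rest : List (String × Int)) (vs : List String) :
    (vs.map (pvPen ((kw, p) :: rest))).sum
      = p * ((vs.filter (fun v => PySem.Str.isIn kw v)).length : Int)
        + ((vs.filter (fun v => ¬ PySem.Str.isIn kw v)).map (pvPen rest)).sum := by
  induction vs with
  | nil => simp
  | cons v t ih =>
    simp only [decide_not] at ih
    have hf : (fun x => if PySem.Str.isIn kw x = true then p else pvPen rest x)
        = pvPen ((kw, p) :: rest) := rfl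
    cases h : PySem.Str.isIn kw v
    · simp only [List.map_cons, List.sum_cons, pvPen, List.filter_cons, h, decide_not,
        Bool.false_eq_true, if_false, decide_false, Bool.not_false, if_true,
        List.map_cons, List.sum_cons]
      rw [hf, ih]; ring
    · simp only [List.map_cons, List.sum_cons, pvPen, List.filter_cons, h, decide_not,
        if_true, decide_true, Bool.not_true, Bool.false_eq_true, if_false,
        List.length_cons]
      rw [hf, ih]; push_cast; ring

theorem pv_kwLoop_eq (T : List (String × Int)) (s : Int) (vs : List String) :
    pvKwLoop T s vs = s - (vs.map (pvPen T)).sum := by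
  induction T generalizing s vs with
  | nil => simp [pvKwLoop, pvPen, List.map_const']
  | cons e rest ih =>
    obtain ⟨kw, p⟩ := e
    rw [pvKwLoop, ih, pv_sum_pen_cons]
    ring

theorem pv_step_eq (s : Int) (v : String) :
    (if PySem.Str.isIn "session_fixation" v then s - 30
     else if PySem.Str.isIn "logout_doesnt_clear_session" v then s - 25
     else if PySem.Str.isIn "concurrent_sessions_allowed" v then s - 20
     else if PySem.Str.isIn "low_session_entropy" v then s - 15
     else s) = s - pvPen pvPenaltyTable v := by
  simp only [pvPenaltyTable, pvPen]
  split_ifs <;> simp_all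

theorem pv_fold_eq (vs : List String) (s : Int) :
    vs.foldl (fun score vuln =>
      if PySem.Str.isIn "session_fixation" vuln then score - 30
      else if PySem.Str.isIn "logout_doesnt_clear_session" vuln then score - 25
      else if PySem.Str.isIn "concurrent_sessions_allowed" vuln then score - 20
      else if PySem.Str.isIn "low_session_entropy" vuln then score - 15
      else score) s = s - (vs.map (pvPen pvPenaltyTable)).sum := by
  induction vs generalizing s with
  | nil => simp
  | cons v t ih => rw [List.foldl_cons, pv_step_eq, ih, List.map_cons, List.sum_cons]; ring

-- ===== VERDICT (by name: the statement is the Claim_ definition above) =====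
theorem score_session_flow_py_spec : Claim_equal_score_session_flow_py := by
  intro finding _
  unfold Spec_score_session_flow_py score_session_flow_py score_session_flow_py_alt
  simp only [pv_fold_eq, pv_kwLoop_eq]
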